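-- pv_equiv track=rewrite | github.com/Ramkumar010/coding-bat | Logic-2/lucky_sum.py | lucky_sum
-- ===== SOURCE A (Python) =====
-- def lucky_sum(a, b, c):
--   count=0
--   list1=[a,b,c]
--   for i in list1:
--     if i==13:
--       break
--     count=count+i
--   return count
-- ===== SOURCE B (Python) =====
-- def lucky_sum(a, b, c):
--     if a == 13:
--         return 0
--     if b == 13:
--         return a
--     if c == 13:
--         return a + b
--     return a + b + c
-- ===== Notes on version B (the rewrite author's own statement) =====
-- stated objective: simpler
-- what changed: Replaced the list-building loop with accumulator and break by a direct early-return conditional chain over the three arguments.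
import Mathlib
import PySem

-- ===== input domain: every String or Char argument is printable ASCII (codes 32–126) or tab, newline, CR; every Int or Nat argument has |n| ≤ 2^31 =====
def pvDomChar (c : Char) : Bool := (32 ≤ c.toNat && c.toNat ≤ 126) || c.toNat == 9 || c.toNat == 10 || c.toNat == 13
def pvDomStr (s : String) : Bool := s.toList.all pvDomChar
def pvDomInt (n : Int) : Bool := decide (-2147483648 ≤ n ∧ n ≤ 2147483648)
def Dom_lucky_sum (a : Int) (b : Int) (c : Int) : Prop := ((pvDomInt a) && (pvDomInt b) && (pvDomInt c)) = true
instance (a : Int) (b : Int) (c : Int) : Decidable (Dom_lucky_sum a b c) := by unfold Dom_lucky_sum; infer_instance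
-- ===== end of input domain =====

-- B replaces A's list+loop+break with a direct conditional chain (objective: simpler).


-- ===== PORT A =====
-- loop over [a,b,c] with accumulator `count` and break on 13, as in A
def luckyLoop (xs : List Int) (count : Int) : Int :=
  match xs with
  | [] => count
  | i :: rest => if i == 13 then count else luckyLoop rest (count + i)

def lucky_sum (a : Int) (b : Int) (c : Int) : Int :=
  luckyLoop [a, b, c] 0

-- ===== PORT B =====
def lucky_sum_alt (a : Int) (b : Int) (c : Int) : Int :=
  if a == 13 then 0
  else if b == 13 then a
  else if c == 13 then a + b
  else a + b + c

-- ===== PRECONDITION & SPEC =====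
def Spec_lucky_sum (a : Int) (b : Int) (c : Int) (out : Int) : Prop := out = lucky_sum_alt a b c
instance (a : Int) (b : Int) (c : Int) (out : Int) : Decidable (Spec_lucky_sum a b c out) := by unfold Spec_lucky_sum; infer_instance

-- ===== CLAIM (what is proved, stated in full; the proofs are below) =====
def Claim_equal_lucky_sum : Prop := ∀ (a : Int) (b : Int) (c : Int), Dom_lucky_sum a b c → Spec_lucky_sum a b c (lucky_sum a b c)

-- ===== LEMMAS AND PROOFS =====

-- ===== VERDICT (by name: the statement is the Claim_ definition above) =====
theorem lucky_sum_spec : Claim_equal_lucky_sum := by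
  intro a b c _
  unfold Spec_lucky_sum lucky_sum lucky_sum_alt luckyLoop
  by_cases ha : a == 13 <;> by_cases hb : b == 13 <;> by_cases hc : c == 13 <;>
    simp [luckyLoop, ha, hb, hc]
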